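-- pv_equiv track=rewrite | github.com/TejasRGitHub/Search-Engine | searchRetrieval.py | getDFFromAllDocs
-- ===== SOURCE A (Python) =====
-- def getDFFromAllDocs(allDocsDict):
--     dfDict = dict()
--     intDict = dict()  #Intermediate dictionary
--     for doc in allDocsDict:
--         textFromDoc = allDocsDict[doc]
--         #Create a Inverted Index
--         tokens = textFromDoc.split()
--         for token in tokens:
--             if token in intDict:
--                 if doc not in intDict[token]:
--                     intDict[token].append(doc)
--             else:
--                 intDict[token] = [doc]
--
--     for dictVal in intDict:
--         dfDict[dictVal] = len(intDict[dictVal])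
--     return dfDict
-- ===== SOURCE B (Python) =====
-- def getDFFromAllDocs(allDocsDict):
--     dfDict = {}
--     for doc in allDocsDict:
--         # unique tokens of this doc, first-occurrence order; one counting pass, no inverted index
--         for token in dict.fromkeys(allDocsDict[doc].split()):
--             dfDict[token] = dfDict.get(token, 0) + 1
--     return dfDict
-- ===== Notes on version B (the rewrite author's own statement) =====
-- stated objective: alternative
-- what changed: B drops A's inverted index (per-token doc lists) and its second length-counting pass: it deduplicates each document's tokens once (dict.fromkeys) and counts them directly into a single counter dict, removing A's per-occurrence 'doc not in intDict[token]' list scan.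
import Mathlib
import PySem

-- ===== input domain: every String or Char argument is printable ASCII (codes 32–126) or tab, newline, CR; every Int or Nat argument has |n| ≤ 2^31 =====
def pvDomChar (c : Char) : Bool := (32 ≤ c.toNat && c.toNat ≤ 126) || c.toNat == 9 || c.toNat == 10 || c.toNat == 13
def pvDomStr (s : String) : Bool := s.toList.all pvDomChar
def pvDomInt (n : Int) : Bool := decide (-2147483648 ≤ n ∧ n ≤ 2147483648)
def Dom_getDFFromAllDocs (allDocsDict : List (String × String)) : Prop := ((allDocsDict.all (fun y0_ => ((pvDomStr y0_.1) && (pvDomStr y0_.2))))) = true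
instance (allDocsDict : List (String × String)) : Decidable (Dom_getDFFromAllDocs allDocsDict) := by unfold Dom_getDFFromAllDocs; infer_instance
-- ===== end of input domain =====

-- B drops A's inverted index and its second length-counting pass: it counts each doc's
-- deduplicated tokens directly into one counter dict (objective: alternative single-pass counting).

-- ===== PORT A =====
def getDFFromAllDocs (allDocsDict : List (String × String)) : List (String × Int) :=
  let d := PySem.Dict.ofList allDocsDict
  let intDict : PySem.Dict String (List String) :=
    d.keys.foldl (fun intDict doc =>
      -- textFromDoc = allDocsDict[doc]; doc is taken from the dict's keys, so the "" default is never used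
      let textFromDoc := d.getD doc ""
      let tokens := PySem.Str.split₀ textFromDoc
      tokens.foldl (fun intDict token =>
        if intDict.contains token then
          let docs := intDict.getD token []
          if docs.contains doc then intDict
          else intDict.insert token (docs ++ [doc])
        else intDict.insert token [doc]) intDict) PySem.Dict.empty
  (intDict.keys.foldl (fun dfDict dictVal =>
      dfDict.insert dictVal ((intDict.getD dictVal []).length : Int))
    (PySem.Dict.empty : PySem.Dict String Int)).items

-- ===== PORT B =====
def getDFFromAllDocs_alt (allDocsDict : List (String × String)) : List (String × Int) :=
  let d := PySem.Dict.ofList allDocsDict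
  (d.keys.foldl (fun dfDict doc =>
      (PySem.List.dedup (PySem.Str.split₀ (d.getD doc ""))).foldl
        (fun dfDict token => dfDict.insert token (dfDict.getD token 0 + 1)) dfDict)
    (PySem.Dict.empty : PySem.Dict String Int)).items

-- ===== PRECONDITION & SPEC =====
def Spec_getDFFromAllDocs (allDocsDict : List (String × String)) (out : List (String × Int)) : Prop := out = getDFFromAllDocs_alt allDocsDict
instance (allDocsDict : List (String × String)) (out : List (String × Int)) : Decidable (Spec_getDFFromAllDocs allDocsDict out) := by unfold Spec_getDFFromAllDocs; infer_instance

-- ===== CLAIM (what is proved, stated in full; the proofs are below) =====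
def Claim_equal_getDFFromAllDocs : Prop := ∀ (allDocsDict : List (String × String)), Dom_getDFFromAllDocs allDocsDict → Spec_getDFFromAllDocs allDocsDict (getDFFromAllDocs allDocsDict)

-- ===== LEMMAS AND PROOFS =====

def pvMapLen (D : PySem.Dict String (List String)) : PySem.Dict String Int :=
  PySem.Dict.mk (D.items.map (fun p => (p.1, (p.2.length : Int))))
def pvHasDoc (D : PySem.Dict String (List String)) (doc t : String) : Bool :=
  (D.get? t).elim false (fun docs => docs.contains doc)
def pvDedupFrom (f : String → Bool) : List String → List String
  | [] => []
  | t :: ts => if f t then pvDedupFrom f ts else t :: pvDedupFrom (fun u => f u || u == t) ts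
theorem pvMapLen_get? (D : PySem.Dict String (List String)) (t : String) :
    (pvMapLen D).get? t = (D.get? t).map (fun docs => (docs.length : Int)) := by
  simp only [pvMapLen, PySem.Dict.get?, List.find?_map, Option.map_map]; rfl
theorem pvMapLen_contains (D : PySem.Dict String (List String)) (t : String) :
    (pvMapLen D).contains t = D.contains t := by
  simp only [pvMapLen, PySem.Dict.contains, List.any_map]; rfl
theorem pvMapLen_insert (D : PySem.Dict String (List String)) (k : String) (v : List String) :
    pvMapLen (D.insert k v) = (pvMapLen D).insert k (v.length : Int) := by
  unfold PySem.Dict.insert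
  rw [pvMapLen_contains]
  split_ifs with h
  · simp only [pvMapLen, List.map_map]
    congr 1
    apply List.map_congr_left
    intro p _
    by_cases hp : p.1 == k <;> simp [hp, Function.comp]
  · simp [pvMapLen]


-- Set.ofList's fold is pvDedupFrom relative to the accumulator's membership
theorem pvOfList_dedupFrom : ∀ (ts acc : List String),
    ts.foldl PySem.Set.add acc = acc ++ pvDedupFrom (fun t => acc.contains t) ts := by
  intro ts
  induction ts with
  | nil => intro acc; simp [pvDedupFrom]
  | cons t ts ih =>
    intro acc
    simp only [List.foldl_cons, pvDedupFrom, PySem.Set.add, PySem.Set.contains]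
    by_cases h : acc.contains t = true
    · rw [if_pos h, if_pos h, ih acc]
    · rw [if_neg h, if_neg h, ih (acc ++ [t])]
      have : (fun u => (acc ++ [t]).contains u) = (fun u => acc.contains u || u == t) := by
        funext u
        simp only [List.contains_append]
        congr 1
        by_cases hu : u = t
        · simp [hu]
        · simp [hu, beq_eq_false_iff_ne.mpr hu]
      rw [this, List.append_assoc]
      rfl

theorem pvDedup_eq (ts : List String) :
    PySem.List.dedup ts = pvDedupFrom (fun _ => false) ts := by
  have h := pvOfList_dedupFrom ts []
  have h2 : (fun t => ([] : List String).contains t) = (fun _ => false) := by funext u; simp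
  rw [h2] at h
  simpa [PySem.List.dedup, PySem.Set.ofList, PySem.Set.empty] using h

-- inner loop: A's per-doc token loop on the inverted index tracks B's counting loop
theorem pvInner (doc : String) : ∀ (ts : List String) (D : PySem.Dict String (List String)) (f : String → Bool),
    (∀ t, pvHasDoc D doc t = f t) →
    pvMapLen (ts.foldl (fun intDict token =>
        if intDict.contains token then
          let docs := intDict.getD token []
          if docs.contains doc then intDict
          else intDict.insert token (docs ++ [doc])
        else intDict.insert token [doc]) D)
      = (pvDedupFrom f ts).foldl (fun dfDict token => dfDict.insert token (dfDict.getD token 0 + 1)) (pvMapLen D) := by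
  intro ts
  induction ts with
  | nil => intro D f _; simp [pvDedupFrom]
  | cons t ts ih =>
    intro D f hf
    simp only [List.foldl_cons, pvDedupFrom]
    by_cases hft : f t = true
    · -- token already carries doc: A skips, dedupFrom drops t
      rw [hft]
      have hh := hf t
      rw [hft] at hh
      obtain ⟨docs, hget, hc⟩ : ∃ docs, D.get? t = some docs ∧ docs.contains doc = true := by
        unfold pvHasDoc at hh
        cases hg : D.get? t with
        | none => rw [hg] at hh; simp at hh
        | some docs => rw [hg] at hh; exact ⟨docs, rfl, hh⟩
      have hcont : D.contains t = true := by
        rw [PySem.Dict.contains_eq_isSome_get?, hget]; rfl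
      have hgd : D.getD t [] = docs := PySem.Dict.getD_of_get?_eq_some D [] hget
      simp only [hcont, if_true, hgd, hc]
      exact ih D f hf
    · -- fresh token for this doc: A appends doc (or creates [doc]), B counts +1
      rw [if_neg hft, List.foldl_cons]
      have hh := hf t
      rw [eq_false_of_ne_true hft] at hh
      have hf' : ∀ u, pvHasDoc (D.insert t ((D.getD t []) ++ [doc])) doc u = (f u || u == t) ∧
          pvHasDoc (D.insert t [doc]) doc u = (f u || u == t) := by
        intro u
        constructor <;>
        · unfold pvHasDoc
          rw [PySem.Dict.get?_insert]
          by_cases hu : u = t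
          · simp [hu]
          · have hb : (u == t) = false := by simp [hu]
            simp only [hu, if_false, hb, Bool.or_false]
            exact hf u
      cases hg : D.get? t with
      | none =>
        have hcont : D.contains t = false := by
          rw [PySem.Dict.contains_eq_isSome_get?, hg]; rfl
        simp only [hcont, Bool.false_eq_true, if_false]
        have hinit : pvMapLen (D.insert t [doc])
            = (pvMapLen D).insert t ((pvMapLen D).getD t 0 + 1) := by
          rw [pvMapLen_insert]
          congr 1
          rw [PySem.Dict.getD_eq_get?_getD, pvMapLen_get?, hg]
          rfl
        rw [ih (D.insert t [doc]) (fun u => f u || u == t) (fun u => (hf' u).2), hinit]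
      | some docs =>
        have hcont : D.contains t = true := by
          rw [PySem.Dict.contains_eq_isSome_get?, hg]; rfl
        have hgd : D.getD t [] = docs := PySem.Dict.getD_of_get?_eq_some D [] hg
        have hc : docs.contains doc = false := by
          unfold pvHasDoc at hh; rw [hg] at hh; exact hh
        simp only [hcont, if_true, hgd, hc, Bool.false_eq_true, if_false]
        have hinit : pvMapLen (D.insert t (docs ++ [doc]))
            = (pvMapLen D).insert t ((pvMapLen D).getD t 0 + 1) := by
          rw [pvMapLen_insert]
          congr 1
          rw [PySem.Dict.getD_eq_get?_getD, pvMapLen_get?, hg]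
          simp
        have hf'' : ∀ u, pvHasDoc (D.insert t (docs ++ [doc])) doc u = (f u || u == t) := by
          intro u; have := (hf' u).1; rwa [hgd] at this
        rw [ih (D.insert t (docs ++ [doc])) (fun u => f u || u == t) hf'', hinit]

-- every doc name in a value of A's inner fold is the current doc or was already present
theorem pvStepA_values (doc : String) : ∀ (ts : List String) (D : PySem.Dict String (List String))
    (p : String × List String),
    p ∈ (ts.foldl (fun intDict token =>
        if intDict.contains token then
          let docs := intDict.getD token []
          if docs.contains doc then intDict
          else intDict.insert token (docs ++ [doc])
        else intDict.insert token [doc]) D).items →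
    ∀ x ∈ p.2, x = doc ∨ ∃ q ∈ D.items, x ∈ q.2 := by
  intro ts
  induction ts with
  | nil => intro D p hp x hx; exact Or.inr ⟨p, hp, hx⟩
  | cons t ts ih =>
    intro D p hp x hx
    rw [List.foldl_cons] at hp
    rcases ih _ p hp x hx with h | ⟨q, hq, hxq⟩
    · exact Or.inl h
    · -- q is an item of the one-step dict; push back to D
      by_cases hc : D.contains t = true
      · simp only [hc, if_true] at hq
        by_cases hd : (D.getD t []).contains doc = true
        · simp only [hd, if_true] at hq
          exact Or.inr ⟨q, hq, hxq⟩
        · simp only [hd, Bool.false_eq_true, if_false] at hq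
          rcases (PySem.Dict.mem_items_insert _ _ _ _).1 hq with hq1 | ⟨hq2, _⟩
          · subst hq1
            rcases List.mem_append.1 hxq with hx1 | hx2
            · right
              have hs := hc
              rw [PySem.Dict.contains_eq_isSome_get?] at hs
              rcases Option.isSome_iff_exists.1 hs with ⟨docs, hg⟩
              refine ⟨(t, docs), PySem.Dict.mem_items_of_get?_eq_some D hg, ?_⟩
              rwa [PySem.Dict.getD_of_get?_eq_some D [] hg] at hx1
            · exact Or.inl (List.mem_singleton.1 hx2)
          · exact Or.inr ⟨q, hq2, hxq⟩
      · simp only [hc, if_false] at hq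
        rcases (PySem.Dict.mem_items_insert _ _ _ _).1 hq with hq1 | ⟨hq2, _⟩
        · subst hq1; exact Or.inl (List.mem_singleton.1 hxq)
        · exact Or.inr ⟨q, hq2, hxq⟩

-- keys stay Nodup through A's inner fold
theorem pvStepA_nodup (doc : String) : ∀ (ts : List String) (D : PySem.Dict String (List String)),
    D.keys.Nodup →
    (ts.foldl (fun intDict token =>
        if intDict.contains token then
          let docs := intDict.getD token []
          if docs.contains doc then intDict
          else intDict.insert token (docs ++ [doc])
        else intDict.insert token [doc]) D).keys.Nodup := by
  intro ts
  induction ts with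
  | nil => intro D h; exact h
  | cons t ts ih =>
    intro D h
    rw [List.foldl_cons]
    apply ih
    by_cases hc : D.contains t = true
    · simp only [hc, if_true]
      split_ifs with hd
      · exact h
      · exact PySem.Dict.nodup_keys_insert _ _ _ h
    · simp only [hc, if_false]
      exact PySem.Dict.nodup_keys_insert _ _ _ h

-- outer loop: B's counting fold tracks the mapLen image of A's index-building fold
theorem pvOuter (tokf : String → List String) : ∀ (ds : List String) (D : PySem.Dict String (List String)),
    (∀ doc ∈ ds, ∀ p ∈ D.items, doc ∉ p.2) → ds.Nodup →
    ds.foldl (fun dfDict doc =>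
        (PySem.List.dedup (tokf doc)).foldl
          (fun dfDict token => dfDict.insert token (dfDict.getD token 0 + 1)) dfDict) (pvMapLen D)
      = pvMapLen (ds.foldl (fun intDict doc =>
          (tokf doc).foldl (fun intDict token =>
            if intDict.contains token then
              let docs := intDict.getD token []
              if docs.contains doc then intDict
              else intDict.insert token (docs ++ [doc])
            else intDict.insert token [doc]) intDict) D) := by
  intro ds
  induction ds with
  | nil => intro D _ _; rfl
  | cons doc ds ih =>
    intro D hinv hnd
    rw [List.foldl_cons, List.foldl_cons]
    have hzero : ∀ t, pvHasDoc D doc t = (fun _ => false) t := by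
      intro t
      unfold pvHasDoc
      cases hg : D.get? t with
      | none => rfl
      | some docs =>
        have hmem := PySem.Dict.mem_items_of_get?_eq_some D hg
        have := hinv doc (List.mem_cons_self) _ hmem
        simpa using this
    have hstep := pvInner doc (tokf doc) D (fun _ => false) hzero
    rw [pvDedup_eq, hstep.symm]
    apply ih
    · intro d' hd' p hp hmem
      rcases pvStepA_values doc (tokf doc) D p hp d' hmem with h1 | ⟨q, hq, hxq⟩
      · subst h1
        exact (List.nodup_cons.1 hnd).1 hd'
      · exact hinv d' (List.mem_cons_of_mem _ hd') q hq hxq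
    · exact (List.nodup_cons.1 hnd).2

-- A's second length-counting pass over a Nodup-keyed dict is exactly pvMapLen
theorem pvSecondPass (D : PySem.Dict String (List String)) (hnd : D.keys.Nodup) :
    (D.keys.foldl (fun dfDict dictVal =>
        dfDict.insert dictVal ((D.getD dictVal []).length : Int))
      (PySem.Dict.empty : PySem.Dict String Int)).items = (pvMapLen D).items := by
  rw [PySem.Dict.items_foldl_insert_fresh D.keys (fun a => a)
        (fun a => ((D.getD a []).length : Int)) PySem.Dict.empty
        (fun a _ => PySem.Dict.contains_empty a) (by simpa using hnd)]
  simp only [pvMapLen]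
  rw [PySem.Dict.items_eq_map_keys D hnd []]
  simp only [PySem.Dict.empty, List.nil_append, List.map_map]
  rfl

theorem pvOuterNodup (tokf : String → List String) : ∀ (ds : List String) (D : PySem.Dict String (List String)),
    D.keys.Nodup →
    (ds.foldl (fun intDict doc =>
        (tokf doc).foldl (fun intDict token =>
          if intDict.contains token then
            let docs := intDict.getD token []
            if docs.contains doc then intDict
            else intDict.insert token (docs ++ [doc])
          else intDict.insert token [doc]) intDict) D).keys.Nodup := by
  intro ds
  induction ds with
  | nil => intro D h; exact h
  | cons doc ds ih =>
    intro D h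
    rw [List.foldl_cons]
    exact ih _ (pvStepA_nodup doc (tokf doc) D h)

-- ===== VERDICT (by name: the statement is the Claim_ definition above) =====
theorem getDFFromAllDocs_spec : Claim_equal_getDFFromAllDocs := by
  intro l _
  unfold Spec_getDFFromAllDocs getDFFromAllDocs getDFFromAllDocs_alt
  have hkeys : (PySem.Dict.ofList l).keys.Nodup := PySem.Dict.nodup_keys_ofList l
  have hempty : (PySem.Dict.empty : PySem.Dict String (List String)).keys.Nodup := by
    simp [PySem.Dict.empty, PySem.Dict.keys]
  rw [pvSecondPass _ (pvOuterNodup _ _ _ hempty)]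
  rw [← pvOuter (fun doc => PySem.Str.split₀ ((PySem.Dict.ofList l).getD doc ""))
        (PySem.Dict.ofList l).keys PySem.Dict.empty (by simp [PySem.Dict.empty]) hkeys]
  rfl
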